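-- pv_equiv track=rewrite | github.com/VincentDesquenne/Article_De_Presse | project_algo.py | topKPaire
-- ===== SOURCE A (Python) =====
-- dico = dict()
--
-- def topKPaire(topTab,tabTri,dico,k,j):
--     if(j >= k):
--         return topTab
--     for cle,valeur in dico.items():
--         if(tabTri[j] == 1):
--             return topTab
--         if(valeur == tabTri[j] and not(topTab.get(cle))):
--             topTab[cle] =valeur
--             break;
--     return topKPaire(topTab,tabTri,dico,k,j+1)
-- ===== SOURCE B (Python) =====
-- def topKPaire(topTab, tabTri, dico, k, j):
--     if not dico:
--         return topTab
--     # bucket the candidate keys by their value, once, in dict order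
--     buckets = {}
--     for cle, valeur in dico.items():
--         buckets.setdefault(valeur, []).append(cle)
--     while j < k:
--         v = tabTri[j]
--         if v == 1:
--             return topTab
--         bucket = buckets.get(v, [])
--         # lazily discard keys that already hold a count
--         while bucket and topTab.get(bucket[0]):
--             bucket.pop(0)
--         if bucket:
--             topTab[bucket[0]] = v
--         j += 1
--     return topTab
-- ===== Notes on version B (the rewrite author's own statement) =====
-- stated objective: alternative
-- what changed: A recursively rescans the whole dico dict at every target position; B groups the keys into per-value queues once and serves each target position from the front of its queue, lazily discarding keys that already hold a count, in an iterative loop.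
import Mathlib
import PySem

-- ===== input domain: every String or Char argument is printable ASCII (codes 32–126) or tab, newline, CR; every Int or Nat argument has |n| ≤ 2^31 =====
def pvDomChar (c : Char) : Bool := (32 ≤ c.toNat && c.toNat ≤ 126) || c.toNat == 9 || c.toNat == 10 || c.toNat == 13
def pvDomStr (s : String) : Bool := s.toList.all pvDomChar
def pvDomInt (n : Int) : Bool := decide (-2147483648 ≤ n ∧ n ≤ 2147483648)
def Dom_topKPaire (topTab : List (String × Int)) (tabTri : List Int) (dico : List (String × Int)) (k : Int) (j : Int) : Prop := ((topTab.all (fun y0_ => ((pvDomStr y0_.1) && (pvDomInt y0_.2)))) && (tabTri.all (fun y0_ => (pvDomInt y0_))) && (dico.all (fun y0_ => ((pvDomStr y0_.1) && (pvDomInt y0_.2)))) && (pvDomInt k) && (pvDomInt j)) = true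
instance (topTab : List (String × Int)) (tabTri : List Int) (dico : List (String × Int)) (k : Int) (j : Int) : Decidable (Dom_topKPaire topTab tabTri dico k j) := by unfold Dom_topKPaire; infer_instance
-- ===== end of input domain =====

-- B groups the candidate keys into per-value queues once and serves each target position from
-- the front of its queue with lazy discarding (objective: alternative).  Python A and B both
-- mutate topTab in place; the equivalence proved here is about the returned dict (item list).

-- ===== PORT A =====
-- inner `for cle,valeur in dico.items()` loop of A at recursion level j:
-- .inl t = `return topTab` taken inside the loop, .inr t = fall through to the recursive call
def topKScan (topTab : PySem.Dict String Int) (tabTri : List Int) (items : List (String × Int)) (j : Int) :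
    Sum (PySem.Dict String Int) (PySem.Dict String Int) :=
  match items with
  | [] => .inr topTab
  | (cle, valeur) :: rest =>
      if PySem.List.pyGetD tabTri j 0 == 1 then .inl topTab
      else if valeur == PySem.List.pyGetD tabTri j 0 && topTab.getD cle 0 == 0 then
        -- `not(topTab.get(cle))`: absent-or-zero value, i.e. getD _ 0 == 0; then topTab[cle]=valeur; break
        .inr (topTab.insert cle valeur)
      else topKScan topTab tabTri rest j

-- A's recursion on j (tabTri[j] is read via the total pyGetD: Pre_ excludes the IndexError inputs)
def topKGo (topTab : PySem.Dict String Int) (tabTri : List Int) (dico : PySem.Dict String Int) (k j : Int) :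
    PySem.Dict String Int :=
  if k ≤ j then topTab
  else
    match topKScan topTab tabTri dico.items j with
    | .inl t => t
    | .inr t => topKGo t tabTri dico k (j + 1)
termination_by (k - j).toNat
decreasing_by omega

def topKPaire (topTab : List (String × Int)) (tabTri : List Int) (dico : List (String × Int)) (k : Int) (j : Int) : List (String × Int) :=
  (topKGo (PySem.Dict.ofList topTab) tabTri (PySem.Dict.ofList dico) k j).items

-- ===== PORT B =====
-- Source B's `while bucket and topTab.get(bucket[0]): bucket.pop(0)`:
-- drop keys from the front of the queue while their recorded count is truthy (present and non-zero)
def popBusy (t : PySem.Dict String Int) (l : List String) : List String :=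
  match l with
  | [] => []
  | c :: rest => if t.getD c 0 == 0 then c :: rest else popBusy t rest

-- Source B's `while j < k` loop; Python mutates the aliased bucket list in place,
-- modelled by writing the popped queue back into `buckets`
def altLoop (tabTri : List Int) (k : Int) (t : PySem.Dict String Int)
    (buckets : PySem.Dict Int (List String)) (j : Int) : PySem.Dict String Int :=
  if k ≤ j then t
  else
    let v := PySem.List.pyGetD tabTri j 0
    if v == 1 then t
    else
      let b := popBusy t (buckets.getD v [])
      match b with
      | [] => altLoop tabTri k t (buckets.insert v b) (j + 1)
      | c :: _ => altLoop tabTri k (t.insert c v) (buckets.insert v b) (j + 1)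
termination_by (k - j).toNat
decreasing_by all_goals omega

def topKPaire_alt (topTab : List (String × Int)) (tabTri : List Int) (dico : List (String × Int)) (k : Int) (j : Int) : List (String × Int) :=
  let t0 := PySem.Dict.ofList topTab
  let d := PySem.Dict.ofList dico
  if d.items = [] then t0.items
  else
    -- buckets.setdefault(valeur, []).append(cle)
    let buckets := d.items.foldl (fun bk p => bk.modify p.2 [] (· ++ [p.1])) PySem.Dict.empty
    (altLoop tabTri k t0 buckets j).items

-- ===== PRECONDITION & SPEC =====
-- Pre_ excludes exactly the inputs on which A raises IndexError: dico non-empty and the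
-- recursion reaches a j+n with tabTri[j+n] out of range before any early return on value 1.
def Pre_topKPaire (topTab : List (String × Int)) (tabTri : List Int) (dico : List (String × Int)) (k : Int) (j : Int) : Prop :=
  dico = [] ∨ k ≤ j ∨
    ((-(tabTri.length : Int) ≤ j ∧ j < tabTri.length) ∧
      (k ≤ tabTri.length ∨
        ∃ m ∈ List.range ((tabTri.length : Int) - j).toNat, PySem.List.pyGetD tabTri (j + m) 0 = 1))
instance (topTab : List (String × Int)) (tabTri : List Int) (dico : List (String × Int)) (k : Int) (j : Int) : Decidable (Pre_topKPaire topTab tabTri dico k j) := by unfold Pre_topKPaire; infer_instance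

def pvWitness_topKPaire : (List (String × Int)) × List Int × (List (String × Int)) × Int × Int :=
  ([("a", 5)], [3, 2], [("b", 3), ("c", 2)], 2, 0)

def Spec_topKPaire (topTab : List (String × Int)) (tabTri : List Int) (dico : List (String × Int)) (k : Int) (j : Int) (out : List (String × Int)) : Prop := out = topKPaire_alt topTab tabTri dico k j
instance (topTab : List (String × Int)) (tabTri : List Int) (dico : List (String × Int)) (k : Int) (j : Int) (out : List (String × Int)) : Decidable (Spec_topKPaire topTab tabTri dico k j out) := by unfold Spec_topKPaire; infer_instance

-- ===== CLAIM (what is proved, stated in full; the proofs are below) =====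
def Claim_equal_topKPaire : Prop := ∀ (topTab : List (String × Int)) (tabTri : List Int) (dico : List (String × Int)) (k : Int) (j : Int), Dom_topKPaire topTab tabTri dico k j → Pre_topKPaire topTab tabTri dico k j → Spec_topKPaire topTab tabTri dico k j (topKPaire topTab tabTri dico k j)

-- ===== LEMMAS AND PROOFS =====

-- the keys of `items` carrying value v, in dict order
def keysWith (items : List (String × Int)) (v : Int) : List String :=
  (items.filter (fun p => p.2 == v)).map (·.1)

-- the keys of `items` whose value is v and whose current topTab value is falsy, in dict order
def availKeys (items : List (String × Int)) (t : PySem.Dict String Int) (v : Int) : List String :=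
  (items.filter (fun p => p.2 == v && t.getD p.1 0 == 0)).map (·.1)

lemma availKeys_eq (items : List (String × Int)) (t : PySem.Dict String Int) (v : Int) :
    availKeys items t v = (keysWith items v).filter (fun c => t.getD c 0 == 0) := by
  unfold availKeys keysWith
  rw [List.filter_map, List.filter_filter]
  apply congrArg
  apply List.filter_congr
  intro p _
  simp [Bool.and_comm]

lemma keysWith_nodup (items : List (String × Int)) (v : Int)
    (hnd : (items.map Prod.fst).Nodup) : (keysWith items v).Nodup :=
  hnd.sublist ((List.filter_sublist (l := items)).map Prod.fst)

lemma mem_keysWith (items : List (String × Int)) (v : Int) (c : String)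
    (h : c ∈ keysWith items v) : (c, v) ∈ items := by
  obtain ⟨p, hp, hpc⟩ := List.mem_map.mp h
  have hmem := (List.mem_filter.mp hp).1
  have hv : p.2 = v := beq_iff_eq.mp (List.mem_filter.mp hp).2
  have : p = (c, v) := by obtain ⟨a, b⟩ := p; simp only at hpc hv; rw [hpc, hv]
  rwa [this] at hmem

lemma scan_sentinel (t : PySem.Dict String Int) (tabTri : List Int) (items : List (String × Int)) (j : Int)
    (h1 : PySem.List.pyGetD tabTri j 0 = 1) (hne : items ≠ []) :
    topKScan t tabTri items j = .inl t := by
  cases items with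
  | nil => exact absurd rfl hne
  | cons p rest => obtain ⟨cle, valeur⟩ := p; simp [topKScan, h1]

lemma scan_no_sentinel (t : PySem.Dict String Int) (tabTri : List Int) (items : List (String × Int)) (j : Int)
    (h1 : PySem.List.pyGetD tabTri j 0 ≠ 1) :
    topKScan t tabTri items j =
      match availKeys items t (PySem.List.pyGetD tabTri j 0) with
      | [] => .inr t
      | c :: _ => .inr (t.insert c (PySem.List.pyGetD tabTri j 0)) := by
  induction items with
  | nil => simp [topKScan, availKeys]
  | cons p rest ih =>
    obtain ⟨cle, valeur⟩ := p
    have hb : (PySem.List.pyGetD tabTri j 0 == 1) = false := by simpa using h1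
    by_cases hcond : (valeur == PySem.List.pyGetD tabTri j 0 && t.getD cle 0 == 0) = true
    · have hval : valeur = PySem.List.pyGetD tabTri j 0 := by
        have := (Bool.and_eq_true _ _).mp hcond
        exact beq_iff_eq.mp this.1
      simp only [topKScan, hb, Bool.false_eq_true, if_false, hcond, if_true, availKeys,
        List.filter_cons]
      simp [hval]
    · have hcond' : (valeur == PySem.List.pyGetD tabTri j 0 && t.getD cle 0 == 0) = false :=
        Bool.eq_false_iff.mpr hcond
      simp only [topKScan, hb, Bool.false_eq_true, if_false, hcond', availKeys, List.filter_cons]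
      simpa [availKeys] using ih

lemma availKeys_insert_zero (items : List (String × Int)) (t : PySem.Dict String Int) (c : String)
    (hc : t.getD c 0 = 0) (w : Int) : availKeys items (t.insert c 0) w = availKeys items t w := by
  unfold availKeys
  congr 1
  apply List.filter_congr
  intro p _
  have : (t.insert c 0).getD p.1 0 = t.getD p.1 0 := by
    rw [PySem.Dict.getD_insert]
    split
    · next he => rw [he, hc]
    · rfl
  rw [this]

-- the unique entry of `items` whose key heads availKeys items t v has value v
lemma availKeys_head_entry (items : List (String × Int)) (t : PySem.Dict String Int) (v : Int)
    (c : String) (rest : List String) (h : availKeys items t v = c :: rest) :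
    (c, v) ∈ items := by
  have hc : c ∈ availKeys items t v := by rw [h]; exact List.mem_cons_self
  obtain ⟨p, hp, hpc⟩ := List.mem_map.mp hc
  have hmem := (List.mem_filter.mp hp).1
  have hcond := (List.mem_filter.mp hp).2
  have h1 := ((Bool.and_eq_true _ _).mp hcond).1
  have hv : p.2 = v := beq_iff_eq.mp h1
  have : p = (c, v) := by
    obtain ⟨a, b⟩ := p
    simp only at hpc hv
    rw [hpc, hv]
  rwa [this] at hmem

lemma availKeys_key_val (items : List (String × Int)) (t : PySem.Dict String Int) (v : Int)
    (c : String) (rest : List String) (hnd : (items.map Prod.fst).Nodup)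
    (h : availKeys items t v = c :: rest) :
    ∀ p ∈ items, p.1 = c → p.2 = v := by
  intro p hp hpc
  have hcv := availKeys_head_entry items t v c rest h
  have : p = (c, v) := List.inj_on_of_nodup_map hnd hp hcv hpc
  rw [this]

lemma availKeys_insert_same (items : List (String × Int)) (t : PySem.Dict String Int) (v : Int)
    (c : String) (rest : List String) (hnd : (items.map Prod.fst).Nodup)
    (h : availKeys items t v = c :: rest) (hv : v ≠ 0) :
    availKeys items (t.insert c v) v = rest := by
  have hkv := availKeys_key_val items t v c rest hnd h
  have hstep : items.filter (fun p => p.2 == v && (t.insert c v).getD p.1 0 == 0)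
      = items.filter (fun p => !(p.1 == c) && (p.2 == v && t.getD p.1 0 == 0)) := by
    apply List.filter_congr
    intro p hp
    by_cases hpc : p.1 = c
    · have hpv : p.2 = v := hkv p hp hpc
      have : (t.insert c v).getD p.1 0 = v := by rw [hpc]; exact PySem.Dict.getD_insert_self t c v 0
      simp [hpc, hv, hpv]
    · have : (t.insert c v).getD p.1 0 = t.getD p.1 0 := PySem.Dict.getD_insert_of_ne t v 0 hpc
      simp [this, hpc]
  unfold availKeys
  rw [hstep, ← List.filter_filter]
  rw [show (fun (p : String × Int) => !(p.1 == c)) = ((fun x => !(x == c)) ∘ Prod.fst) from rfl]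
  rw [← List.filter_map]
  have hav : (items.filter (fun p => p.2 == v && t.getD p.1 0 == 0)).map Prod.fst = c :: rest := h
  rw [hav]
  have hnodup : (c :: rest).Nodup := by rw [← hav]; exact hnd.sublist ((List.filter_sublist (l := items)).map Prod.fst)
  have hcrest : c ∉ rest := (List.nodup_cons.mp hnodup).1
  simp only [List.filter_cons, beq_self_eq_true, Bool.not_true, Bool.false_eq_true, if_false]
  apply List.filter_eq_self.mpr
  intro x hx
  have : x ≠ c := fun he => hcrest (he ▸ hx)
  simp [this]

lemma availKeys_insert_other (items : List (String × Int)) (t : PySem.Dict String Int) (v w : Int)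
    (c : String) (rest : List String) (hnd : (items.map Prod.fst).Nodup)
    (h : availKeys items t v = c :: rest) (hw : w ≠ v) :
    availKeys items (t.insert c v) w = availKeys items t w := by
  have hkv := availKeys_key_val items t v c rest hnd h
  unfold availKeys
  congr 1
  apply List.filter_congr
  intro p hp
  by_cases hpc : p.1 = c
  · have hpv : p.2 = v := hkv p hp hpc
    have hvw : ¬ v = w := fun he => hw he.symm
    have : (p.2 == w) = false := by simp [hpv, hvw]
    simp [this]
  · have : (t.insert c v).getD p.1 0 = t.getD p.1 0 := PySem.Dict.getD_insert_of_ne t v 0 hpc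
    rw [this]

lemma go_empty (t : PySem.Dict String Int) (tabTri : List Int) (dico : PySem.Dict String Int)
    (h : dico.items = []) (k : Int) : ∀ (n : Nat) (j : Int), (k - j).toNat = n →
    topKGo t tabTri dico k j = t := by
  intro n
  induction n with
  | zero =>
    intro j hn
    unfold topKGo
    rw [if_pos (by omega)]
  | succ m ih =>
    intro j hn
    unfold topKGo
    by_cases hk : k ≤ j
    · rw [if_pos hk]
    · rw [if_neg hk, h]
      simp only [topKScan]
      exact ih (j + 1) (by omega)

lemma buckets_getD (dico : List (String × Int)) (v : Int) :
    ((PySem.Dict.ofList dico).items.foldl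
      (fun bk p => bk.modify p.2 [] (· ++ [p.1])) PySem.Dict.empty).getD v []
    = keysWith (PySem.Dict.ofList dico).items v := by
  set items := (PySem.Dict.ofList dico).items with hitems
  rw [show (List.foldl (fun (bk : PySem.Dict Int (List String)) (p : String × Int) => bk.modify p.2 [] (· ++ [p.1]))
        PySem.Dict.empty items)
      = ((items.map (fun p => (p.2, p.1))).foldl
          (fun (d : PySem.Dict Int (List String)) (q : Int × String) => d.modify q.1 [] (· ++ [q.2]))
          PySem.Dict.empty) from (List.foldl_map (f := fun p : String × Int => (p.2, p.1)) (g := fun (d : PySem.Dict Int (List String)) (q : Int × String) => d.modify q.1 [] (· ++ [q.2]))).symm]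
  rw [PySem.Dict.getD_foldl_modify_append]
  rw [List.filter_map]
  unfold keysWith
  simp [Function.comp_def]

lemma popBusy_sublist (t : PySem.Dict String Int) (l : List String) : (popBusy t l).Sublist l := by
  induction l with
  | nil => simp [popBusy]
  | cons c rest ih =>
    unfold popBusy
    split
    · exact List.Sublist.refl _
    · exact ih.trans (List.sublist_cons_self c rest)

lemma popBusy_filter (t : PySem.Dict String Int) (l : List String) :
    (popBusy t l).filter (fun c => t.getD c 0 == 0) = l.filter (fun c => t.getD c 0 == 0) := by
  induction l with
  | nil => simp [popBusy]
  | cons c rest ih =>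
    unfold popBusy
    split
    · rfl
    · next h =>
      rw [List.filter_cons, if_neg h]
      exact ih

lemma popBusy_head_avail (t : PySem.Dict String Int) (l : List String) (c : String) (r : List String)
    (h : popBusy t l = c :: r) : t.getD c 0 = 0 := by
  induction l with
  | nil => simp [popBusy] at h
  | cons a rest ih =>
    unfold popBusy at h
    split at h
    · next ha => cases h; exact beq_iff_eq.mp ha
    · exact ih h

-- main loop equivalence: the queues' available keys track A's availKeys
lemma go_eq (tabTri : List Int) (dico : PySem.Dict String Int)
    (hne : dico.items ≠ []) (hnd : (dico.items.map Prod.fst).Nodup) (k : Int) :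
    ∀ (n : Nat) (j : Int), (k - j).toNat = n →
    ∀ (t : PySem.Dict String Int) (buckets : PySem.Dict Int (List String)),
      (∀ v, (buckets.getD v []).Sublist (keysWith dico.items v)) →
      (∀ v, (buckets.getD v []).filter (fun c => t.getD c 0 == 0) = availKeys dico.items t v) →
      topKGo t tabTri dico k j = altLoop tabTri k t buckets j := by
  intro n
  induction n with
  | zero =>
    intro j hn t buckets _ _
    have hk : k ≤ j := by omega
    unfold topKGo altLoop
    rw [if_pos hk, if_pos hk]
  | succ m ih =>
    intro j hn t buckets hsub hinv
    have hk : ¬ k ≤ j := by omega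
    unfold topKGo altLoop
    rw [if_neg hk, if_neg hk]
    set v := PySem.List.pyGetD tabTri j 0 with hv
    by_cases h1 : v = 1
    · rw [scan_sentinel t tabTri dico.items j h1 hne]
      simp [h1]
    · have hb1 : (v == 1) = false := by simpa using h1
      rw [scan_no_sentinel t tabTri dico.items j h1]
      simp only [hb1, Bool.false_eq_true, if_false]
      have hfb : (popBusy t (buckets.getD v [])).filter (fun c => t.getD c 0 == 0)
          = availKeys dico.items t v := by rw [popBusy_filter]; exact hinv v
      cases hA : availKeys dico.items t v with
      | nil =>
        have hbnil : popBusy t (buckets.getD v []) = [] := by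
          cases hp : popBusy t (buckets.getD v []) with
          | nil => rfl
          | cons c r =>
            have hav := popBusy_head_avail t _ c r hp
            rw [hp, hA] at hfb
            rw [List.filter_cons, if_pos (by simpa using hav)] at hfb
            exact absurd hfb (by simp)
        rw [hbnil]
        refine ih (j + 1) (by omega) t (buckets.insert v []) ?_ ?_
        · intro w
          rw [PySem.Dict.getD_insert]
          split
          · simp
          · exact hsub w
        · intro w
          rw [PySem.Dict.getD_insert]
          split
          · next he => simp [he, hA]
          · exact hinv w
      | cons c rest =>
        obtain ⟨c0, r, hp⟩ : ∃ c0 r, popBusy t (buckets.getD v []) = c0 :: r := by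
          cases hp : popBusy t (buckets.getD v []) with
          | nil => rw [hp, hA] at hfb; simp at hfb
          | cons c0 r => exact ⟨c0, r, rfl⟩
        have hav0 := popBusy_head_avail t _ c0 r hp
        have hfb' : c0 :: r.filter (fun c => t.getD c 0 == 0) = c :: rest := by
          rw [hp, hA] at hfb
          rwa [List.filter_cons, if_pos (by simpa using hav0)] at hfb
        have hc0 : c0 = c := (List.cons.injEq _ _ _ _).mp hfb' |>.1
        have hr : r.filter (fun c => t.getD c 0 == 0) = rest := ((List.cons.injEq _ _ _ _).mp hfb').2
        rw [hp, hc0]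
        have hbsub : (c :: r).Sublist (keysWith dico.items v) := by
          rw [← hc0, ← hp]; exact (popBusy_sublist t _).trans (hsub v)
        have hbnd : (c :: r).Nodup := (keysWith_nodup dico.items v hnd).sublist hbsub
        have hcr : c ∉ r := (List.nodup_cons.mp hbnd).1
        -- new t after the insertion
        by_cases hv0 : v = 0
        · -- inserting value 0 over a falsy slot changes no availability
          have hgetD : ∀ x, (t.insert c v).getD x 0 = t.getD x 0 := by
            intro x
            rw [PySem.Dict.getD_insert]
            split
            · next he => rw [he, ← hc0] at *; rw [hv0, hav0]
            · rfl
          refine ih (j + 1) (by omega) (t.insert c v) (buckets.insert v (c :: r)) ?_ ?_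
          · intro w
            rw [PySem.Dict.getD_insert]
            split
            · next he => rw [he]; exact hbsub
            · exact hsub w
          · intro w
            have hAK : availKeys dico.items (t.insert c v) w = availKeys dico.items t w := by
              rw [hv0]
              exact availKeys_insert_zero dico.items t c (hc0 ▸ hav0) w
            rw [hAK, PySem.Dict.getD_insert]
            have hfeq : ∀ (l : List String), l.filter (fun x => (t.insert c v).getD x 0 == 0)
                = l.filter (fun x => t.getD x 0 == 0) := by
              intro l; apply List.filter_congr; intro x _; rw [hgetD x]
            split
            · next he =>
              rw [he, hfeq]
              have hp' : popBusy t (buckets.getD v []) = c :: r := by rw [hp, hc0]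
              rw [← hp', popBusy_filter]
              exact hinv v
            · rw [hfeq]; exact hinv w
        · -- inserting a non-zero value consumes c
          refine ih (j + 1) (by omega) (t.insert c v) (buckets.insert v (c :: r)) ?_ ?_
          · intro w
            rw [PySem.Dict.getD_insert]
            split
            · next he => rw [he]; exact hbsub
            · exact hsub w
          · intro w
            rw [PySem.Dict.getD_insert]
            by_cases hwv : w = v
            · rw [if_pos hwv, hwv]
              rw [availKeys_insert_same dico.items t v c rest hnd hA hv0]
              rw [List.filter_cons, if_neg (by simp [PySem.Dict.getD_insert_self t c v 0, hv0])]
              rw [← hr]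
              apply List.filter_congr
              intro x hx
              have hxc : x ≠ c := fun he => hcr (he ▸ hx)
              rw [PySem.Dict.getD_insert_of_ne t v 0 hxc]
            · rw [if_neg hwv]
              rw [availKeys_insert_other dico.items t v w c rest hnd hA hwv]
              rw [← hinv w]
              apply List.filter_congr
              intro x hx
              have hxw : x ∈ keysWith dico.items w := (hsub w).mem hx
              have hxc : x ≠ c := by
                intro he
                have h1 : (x, w) ∈ dico.items := mem_keysWith dico.items w x hxw
                have h2 : (c, v) ∈ dico.items := availKeys_head_entry dico.items t v c rest hA
                have : (x, w) = (c, v) := List.inj_on_of_nodup_map hnd h1 h2 (by simpa using he)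
                exact hwv (by simpa using congrArg Prod.snd this)
              rw [PySem.Dict.getD_insert_of_ne t v 0 hxc]

lemma total_eq (topTab : List (String × Int)) (tabTri : List Int) (dico : List (String × Int)) (k j : Int) :
    topKPaire topTab tabTri dico k j = topKPaire_alt topTab tabTri dico k j := by
  unfold topKPaire topKPaire_alt
  by_cases hd : (PySem.Dict.ofList dico).items = []
  · rw [if_pos hd, go_empty _ _ _ hd k ((k - j).toNat) j rfl]
  · rw [if_neg hd]
    refine congrArg PySem.Dict.items ?_
    refine go_eq tabTri (PySem.Dict.ofList dico) hd (PySem.Dict.nodup_keys_ofList dico)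
      k ((k - j).toNat) j rfl (PySem.Dict.ofList topTab) _ ?_ ?_
    · intro v
      rw [buckets_getD]
    · intro v
      rw [buckets_getD, ← availKeys_eq]

-- ===== VERDICT (by name: the statement is the Claim_ definition above) =====
theorem topKPaire_spec : Claim_equal_topKPaire := by
  intro topTab tabTri dico k j _ _
  unfold Spec_topKPaire
  exact total_eq topTab tabTri dico k j
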